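-- pv_equiv track=rewrite | github.com/kanakprerna/LeapUniRankBot | ranking/pkWAUniRankBot.py | classify_university_type
-- ===== SOURCE A (Python) =====
-- def classify_university_type(name: str) -> str:
--     """Classify university based on name patterns"""
--     name_lower = name.lower()
--
--     if any(word in name_lower for word in ['business school', 'medical school', 'law school']):
--         uni_type = 'SPECIALIST_SCHOOL'
--     elif any(word in name_lower for word in ['college', 'community college', 'polytechnic']):
--         uni_type = 'COLLEGE_POLYTECHNIC'
--     elif any(word in name_lower for word in ['technical', 'applied', 'technology']):
--         uni_type = 'APPLIED_UNIVERSITY'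
--     elif 'university' in name_lower:
--         if any(word in name_lower for word in ['research', 'institute', 'tech']):
--             uni_type = 'RESEARCH_UNIVERSITY'
--         else:
--             uni_type = 'TEACHING_UNIVERSITY'
--     else:
--         uni_type = 'TEACHING_UNIVERSITY'
--
--     return uni_type
-- ===== SOURCE B (Python) =====
-- RULES = [
--     ("business school", 0), ("medical school", 0), ("law school", 0),
--     ("college", 1), ("community college", 1), ("polytechnic", 1),
--     ("technical", 2), ("applied", 2), ("technology", 2),
-- ]
-- LABELS = ["SPECIALIST_SCHOOL", "COLLEGE_POLYTECHNIC", "APPLIED_UNIVERSITY"]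
--
-- def classify_university_type(name: str) -> str:
--     s = name.lower()
--     best = 3
--     for kw, rank in RULES:
--         if rank < best and kw in s:
--             best = rank
--     if best < 3:
--         return LABELS[best]
--     if "university" in s and ("research" in s or "institute" in s or "tech" in s):
--         return "RESEARCH_UNIVERSITY"
--     return "TEACHING_UNIVERSITY"
-- ===== Notes on version B (the rewrite author's own statement) =====
-- stated objective: alternative
-- what changed: Replaces the if/elif cascade of per-group any() scans with a single fold over a flat (keyword, rank) priority table taking the minimum matching rank, followed by the university sub-rule as the fall-through.
import Mathlib
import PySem

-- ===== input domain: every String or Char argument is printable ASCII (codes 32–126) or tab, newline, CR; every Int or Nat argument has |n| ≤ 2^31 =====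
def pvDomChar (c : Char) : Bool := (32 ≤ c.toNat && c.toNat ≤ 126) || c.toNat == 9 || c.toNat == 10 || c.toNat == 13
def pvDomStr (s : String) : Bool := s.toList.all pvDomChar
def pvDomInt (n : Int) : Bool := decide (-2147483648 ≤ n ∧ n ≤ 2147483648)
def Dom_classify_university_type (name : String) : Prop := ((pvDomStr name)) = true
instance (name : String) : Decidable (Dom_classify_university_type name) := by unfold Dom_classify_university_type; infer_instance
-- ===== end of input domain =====

-- B replaces A's if/elif cascade of any() tests by a single fold over a flat (keyword, rank) table
-- taking the minimum matching rank (objective: alternative decomposition, same cost).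


-- ===== PORT A =====
def classify_university_type (name : String) : String :=
  let name_lower := PySem.Str.lower name
  if ([("business school" : String), "medical school", "law school"].any
        (fun w => PySem.Str.isIn w name_lower)) then
    "SPECIALIST_SCHOOL"
  else if ([("college" : String), "community college", "polytechnic"].any
        (fun w => PySem.Str.isIn w name_lower)) then
    "COLLEGE_POLYTECHNIC"
  else if ([("technical" : String), "applied", "technology"].any
        (fun w => PySem.Str.isIn w name_lower)) then
    "APPLIED_UNIVERSITY"
  else if PySem.Str.isIn "university" name_lower then
    if ([("research" : String), "institute", "tech"].any
          (fun w => PySem.Str.isIn w name_lower)) then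
      "RESEARCH_UNIVERSITY"
    else
      "TEACHING_UNIVERSITY"
  else
    "TEACHING_UNIVERSITY"

-- ===== PORT B =====
def pvRules : List (String × Nat) :=
  [("business school", 0), ("medical school", 0), ("law school", 0),
   ("college", 1), ("community college", 1), ("polytechnic", 1),
   ("technical", 2), ("applied", 2), ("technology", 2)]

def pvLabels : List String := ["SPECIALIST_SCHOOL", "COLLEGE_POLYTECHNIC", "APPLIED_UNIVERSITY"]

def classify_university_type_alt (name : String) : String :=
  let s := PySem.Str.lower name
  let best := pvRules.foldl
    (fun best kr => if kr.2 < best ∧ PySem.Str.isIn kr.1 s then kr.2 else best) 3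
  if best < 3 then
    (PySem.List.pyGet? pvLabels (Int.ofNat best)).getD ""  -- LABELS[best]; in range whenever best < 3
  else if PySem.Str.isIn "university" s ∧
       (PySem.Str.isIn "research" s ∨ PySem.Str.isIn "institute" s ∨ PySem.Str.isIn "tech" s) then
    "RESEARCH_UNIVERSITY"
  else
    "TEACHING_UNIVERSITY"

-- ===== PRECONDITION & SPEC =====
def Spec_classify_university_type (name : String) (out : String) : Prop := out = classify_university_type_alt name
instance (name : String) (out : String) : Decidable (Spec_classify_university_type name out) := by unfold Spec_classify_university_type; infer_instance

-- ===== CLAIM (what is proved, stated in full; the proofs are below) =====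
def Claim_equal_classify_university_type : Prop := ∀ (name : String), Dom_classify_university_type name → Spec_classify_university_type name (classify_university_type name)

-- ===== LEMMAS AND PROOFS =====
-- The flat-table fold picks the first matching keyword's rank (ranks are nondecreasing in the table).
theorem fold_best (s : String) :
    pvRules.foldl
      (fun best kr => if kr.2 < best ∧ PySem.Str.isIn kr.1 s then kr.2 else best) 3 =
    if (PySem.Str.isIn "business school" s || (PySem.Str.isIn "medical school" s ||
          PySem.Str.isIn "law school" s)) = true then 0
    else if (PySem.Str.isIn "college" s || (PySem.Str.isIn "community college" s ||
          PySem.Str.isIn "polytechnic" s)) = true then 1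
    else if (PySem.Str.isIn "technical" s || (PySem.Str.isIn "applied" s ||
          PySem.Str.isIn "technology" s)) = true then 2
    else 3 := by
  cases h1 : PySem.Str.isIn "business school" s
  · cases h2 : PySem.Str.isIn "medical school" s
    · cases h3 : PySem.Str.isIn "law school" s
      · cases h4 : PySem.Str.isIn "college" s
        · cases h5 : PySem.Str.isIn "community college" s
          · cases h6 : PySem.Str.isIn "polytechnic" s
            · cases h7 : PySem.Str.isIn "technical" s
              · cases h8 : PySem.Str.isIn "applied" s
                · cases h9 : PySem.Str.isIn "technology" s
                  · simp [-PySem.Str.isIn_eq, pvRules, List.foldl, h1, h2, h3, h4, h5, h6, h7, h8, h9]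
                  · simp [-PySem.Str.isIn_eq, pvRules, List.foldl, h1, h2, h3, h4, h5, h6, h7, h8, h9]
                · simp [-PySem.Str.isIn_eq, pvRules, List.foldl, h1, h2, h3, h4, h5, h6, h7, h8]
              · simp [-PySem.Str.isIn_eq, pvRules, List.foldl, h1, h2, h3, h4, h5, h6, h7]
            · simp [-PySem.Str.isIn_eq, pvRules, List.foldl, h1, h2, h3, h4, h5, h6]
          · simp [-PySem.Str.isIn_eq, pvRules, List.foldl, h1, h2, h3, h4, h5]
        · simp [-PySem.Str.isIn_eq, pvRules, List.foldl, h1, h2, h3, h4]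
      · simp [-PySem.Str.isIn_eq, pvRules, List.foldl, h1, h2, h3]
    · simp [-PySem.Str.isIn_eq, pvRules, List.foldl, h1, h2]
  · simp [-PySem.Str.isIn_eq, pvRules, List.foldl, h1]

theorem classify_eq (name : String) :
    classify_university_type name = classify_university_type_alt name := by
  simp only [classify_university_type, classify_university_type_alt]
  rw [fold_best]
  simp only [List.any_cons, List.any_nil, Bool.or_false]
  cases hg1 : (PySem.Str.isIn "business school" (PySem.Str.lower name) ||
      (PySem.Str.isIn "medical school" (PySem.Str.lower name) ||
        PySem.Str.isIn "law school" (PySem.Str.lower name)))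
  · cases hg2 : (PySem.Str.isIn "college" (PySem.Str.lower name) ||
        (PySem.Str.isIn "community college" (PySem.Str.lower name) ||
          PySem.Str.isIn "polytechnic" (PySem.Str.lower name)))
    · cases hg3 : (PySem.Str.isIn "technical" (PySem.Str.lower name) ||
          (PySem.Str.isIn "applied" (PySem.Str.lower name) ||
            PySem.Str.isIn "technology" (PySem.Str.lower name)))
      · cases hu : PySem.Str.isIn "university" (PySem.Str.lower name)
        · simp [-PySem.Str.isIn_eq]
        · cases hr : PySem.Str.isIn "research" (PySem.Str.lower name) <;>
          cases hi : PySem.Str.isIn "institute" (PySem.Str.lower name) <;>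
          cases ht : PySem.Str.isIn "tech" (PySem.Str.lower name) <;>
          simp [-PySem.Str.isIn_eq]
      · simp [-PySem.Str.isIn_eq, pvLabels, PySem.List.pyGet?, PySem.List.pyIdx?]
    · simp [-PySem.Str.isIn_eq, pvLabels, PySem.List.pyGet?, PySem.List.pyIdx?]
  · simp [-PySem.Str.isIn_eq, pvLabels, PySem.List.pyGet?, PySem.List.pyIdx?]

-- ===== VERDICT (by name: the statement is the Claim_ definition above) =====
theorem classify_university_type_spec : Claim_equal_classify_university_type := by
  intro name _
  unfold Spec_classify_university_type
  exact classify_eq name
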